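-- pv_equiv track=rewrite | github.com/TEAMLAB-Lecture/morsecode-JaeheeRyu | morsecode.py | is_validated_morse_code
-- ===== SOURCE A (Python) =====
-- def get_morse_code_dict():
--     morse_code = {
--         "A": ".-", "N": "-.", "B": "-...", "O": "---", "C": "-.-.", "P": ".--.", "D": "-..", "Q": "--.-", "E": ".",
--         "R": ".-.", "F": "..-.", "S": "...", "G": "--.", "T": "-", "H": "....", "U": "..-", "I": "..", "V": "...-",
--         "K": "-.-", "X": "-..-", "J": ".---", "W": ".--", "L": ".-..", "Y": "-.--", "M": "--", "Z": "--.."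
--     }
--     return morse_code
--
-- def is_validated_morse_code(user_input):
--     """
--     Input:
--         - user_input : 문자열값으로 사용자가 입력하는 문자
--     Output:
--         - 입력한 값이 아래에 해당될 경우 False, 그렇지 않으면 True
--           1) "-","."," "외 다른 글자가 포함되어 있는 경우
--           2) get_morse_code_dict 함수에 정의된 Morse Code 부호외 다른 코드가 입력된 경우 ex)......
--     Examples:
--         >>> import morsecode as mc
--         >>> mc.is_validated_morse_code("..")
--         True
--         >>> mc.is_validated_morse_code("..-")
--         True
--         >>> mc.is_validated_morse_code("..-..")
--         False
--         >>> mc.is_validated_morse_code(". . . .")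
--         True
--         >>> mc.is_validated_morse_code("-- -- -- --")
--         True
--         >>> mc.is_validated_morse_code("!.1 abc --")
--         False
--     """
--     # ===Modify codes below=============
--     # 조건에 따라 변환되어야 할 결과를 result 변수에 할당 또는 필요에 따라 자유로운 수정
--     conf = user_input[:]
--     result = None
--     for i in ['.', '-', ' ']:
--         try:
--             for j in range(conf.count(i)):
--                 conf = conf.replace(i, '')
--         except:
--             continue
--     if len(conf) != 0:
--         result = False
--     else:
--         input_list = user_input.split()
--         morse_code_dict = get_morse_code_dict()
--         for code in input_list:
--             if code not in morse_code_dict.values():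
--                 result = False
--                 break
--             else:
--                 result = True
--     return result
-- ===== SOURCE B (Python) =====
-- def get_morse_code_dict():
--     morse_code = {
--         "A": ".-", "N": "-.", "B": "-...", "O": "---", "C": "-.-.", "P": ".--.", "D": "-..", "Q": "--.-", "E": ".",
--         "R": ".-.", "F": "..-.", "S": "...", "G": "--.", "T": "-", "H": "....", "U": "..-", "I": "..", "V": "...-",
--         "K": "-.-", "X": "-..-", "J": ".---", "W": ".--", "L": ".-..", "Y": "-.--", "M": "--", "Z": "--.."
--     }
--     return morse_code
--
-- def is_validated_morse_code(user_input):
--     # one left-to-right pass: tokenize and validate as we go (no strip pass, no split)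
--     valid = frozenset(get_morse_code_dict().values())
--     seen = False
--     token = []
--     for ch in user_input + ' ':   # sentinel space flushes the last token
--         if ch == ' ':
--             if token:
--                 if ''.join(token) not in valid:
--                     return False
--                 token = []
--                 seen = True
--         elif ch in '.-':
--             token.append(ch)
--         else:
--             return False
--     return True if seen else None
-- ===== Notes on version B (the rewrite author's own statement) =====
-- stated objective: alternative
-- what changed: Replaces A's staged passes (count/replace stripping loop, then split(), then a break/flag scan over dict values) by a single left-to-right streaming tokenizer with an accumulator that validates each token as it is completed and rejects a bad character the moment it is seen.
import Mathlib
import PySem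

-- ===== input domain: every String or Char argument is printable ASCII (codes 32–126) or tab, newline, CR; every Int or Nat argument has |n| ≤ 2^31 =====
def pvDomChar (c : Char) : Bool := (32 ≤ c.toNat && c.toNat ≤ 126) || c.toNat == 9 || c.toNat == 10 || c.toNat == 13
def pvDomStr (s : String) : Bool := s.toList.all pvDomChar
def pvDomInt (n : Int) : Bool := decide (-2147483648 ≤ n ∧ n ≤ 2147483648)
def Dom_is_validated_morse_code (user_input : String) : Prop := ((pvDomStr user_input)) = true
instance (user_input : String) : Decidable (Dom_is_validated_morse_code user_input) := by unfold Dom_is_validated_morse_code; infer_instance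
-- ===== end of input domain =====

-- B replaces A's staged passes (strip loop, split, break/flag value scan) by one streaming
-- tokenizer that validates tokens as they complete (objective: alternative).

-- shared helper: the Python dict literal of get_morse_code_dict (distinct keys, insertion order)
def pvMorseDict : PySem.Dict String String :=
  PySem.Dict.mk
  [("A", ".-"), ("N", "-."), ("B", "-..."), ("O", "---"), ("C", "-.-."), ("P", ".--."),
   ("D", "-.."), ("Q", "--.-"), ("E", "."), ("R", ".-."), ("F", "..-."), ("S", "..."),
   ("G", "--."), ("T", "-"), ("H", "...."), ("U", "..-"), ("I", ".."), ("V", "...-"),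
   ("K", "-.-"), ("X", "-..-"), ("J", ".---"), ("W", ".--"), ("L", ".-.."), ("Y", "-.--"),
   ("M", "--"), ("Z", "--..")]

-- ===== PORT A =====
-- 'for code in input_list: if code not in values: result = False; break; else: result = True'
def pvLoopCodesA (vals : List String) : List String → Option Bool → Option Bool
  | [], result => result
  | code :: rest, _ =>
      if vals.contains code then pvLoopCodesA vals rest (some true)
      else some false

def is_validated_morse_code (user_input : String) : Option Bool :=
  -- conf = user_input[:]; for i in ['.','-',' ']: for j in range(conf.count(i)): conf = conf.replace(i, '')
  let conf := user_input.toList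
  let conf := ['.', '-', ' '].foldl
    (fun conf i =>
      (List.range (PySem.Chars.count conf [i])).foldl
        (fun acc _ => PySem.Chars.replace acc [i] []) conf)
    conf
  if conf.length ≠ 0 then some false
  else
    let input_list := PySem.Str.split₀ user_input
    pvLoopCodesA (PySem.Dict.values pvMorseDict) input_list none

-- ===== PORT B =====
-- the for-loop of Source B: state = (token, seen); early 'return False' = some false
def pvScanB (valid : List String) : List Char → List Char → Bool → Option Bool
  | [], _token, seen => if seen then some true else none
  | ch :: rest, token, seen =>
      if ch = ' ' then
        if token.isEmpty then pvScanB valid rest token seen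
        else if valid.contains (String.ofList token) then pvScanB valid rest [] true
        else some false
      else if ch = '.' ∨ ch = '-' then pvScanB valid rest (token ++ [ch]) seen
      else some false

def is_validated_morse_code_alt (user_input : String) : Option Bool :=
  let valid := PySem.Dict.values pvMorseDict
  pvScanB valid (user_input.toList ++ [' ']) [] false

-- ===== PRECONDITION & SPEC =====
def Spec_is_validated_morse_code (user_input : String) (out : Option Bool) : Prop := out = is_validated_morse_code_alt user_input
instance (user_input : String) (out : Option Bool) : Decidable (Spec_is_validated_morse_code user_input out) := by unfold Spec_is_validated_morse_code; infer_instance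

-- ===== CLAIM (what is proved, stated in full; the proofs are below) =====
def Claim_equal_is_validated_morse_code : Prop := ∀ (user_input : String), Dom_is_validated_morse_code user_input → Spec_is_validated_morse_code user_input (is_validated_morse_code user_input)

-- ===== LEMMAS AND PROOFS =====

-- counting a single character is List.count
theorem pv_count_go_single (c : Char) :
    ∀ (fuel : Nat) (l : List Char) (acc : Nat), l.length ≤ fuel →
      PySem.Chars.count.go [c] fuel l acc = acc + l.count c := by
  intro fuel
  induction fuel with
  | zero =>
    intro l acc h
    have : l = [] := List.eq_nil_of_length_eq_zero (Nat.le_zero.mp h)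
    subst this
    simp [PySem.Chars.count.go]
  | succ n ih =>
    intro l acc h
    cases l with
    | nil => simp [PySem.Chars.count.go]
    | cons x t =>
      rw [PySem.Chars.count.go]
      by_cases hx : x = c
      · subst hx
        have hpre : [x].isPrefixOf (x :: t) = true := by simp [List.isPrefixOf]
        rw [hpre]
        simp only [if_true, List.length_nil, List.length_cons, List.drop_zero, List.drop_succ_cons]
        rw [ih t (acc + 1) (Nat.le_of_succ_le_succ h)]
        simp
        omega
      · have hpre : [c].isPrefixOf (x :: t) = false := by
          simp [List.isPrefixOf]
          exact fun hcx => absurd hcx.symm hx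
        rw [hpre]
        simp only [Bool.false_eq_true, if_false]
        rw [ih t acc (Nat.le_of_succ_le_succ h)]
        simp [hx]

theorem pv_count_single (cs : List Char) (c : Char) :
    PySem.Chars.count cs [c] = cs.count c := by
  simp only [PySem.Chars.count, List.isEmpty_cons, Bool.false_eq_true, if_false]
  simpa using pv_count_go_single c cs.length cs 0 (le_refl _)

-- replacing a single character by the empty string is a filter
theorem pv_replace_go_single (c : Char) :
    ∀ (fuel : Nat) (l : List Char) (acc : List Char), l.length ≤ fuel →
      PySem.Chars.replace.go [c] [] fuel l acc = acc.reverse ++ l.filter (· != c) := by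
  intro fuel
  induction fuel with
  | zero =>
    intro l acc h
    have : l = [] := List.eq_nil_of_length_eq_zero (Nat.le_zero.mp h)
    subst this
    simp [PySem.Chars.replace.go]
  | succ n ih =>
    intro l acc h
    cases l with
    | nil => simp [PySem.Chars.replace.go]
    | cons x t =>
      rw [PySem.Chars.replace.go]
      by_cases hx : x = c
      · subst hx
        have hpre : [x].isPrefixOf (x :: t) = true := by simp [List.isPrefixOf]
        rw [hpre]
        simp only [if_true, List.length_nil, List.length_cons, List.drop_zero, List.drop_succ_cons,
          List.reverse_nil, List.nil_append]
        rw [ih t acc (Nat.le_of_succ_le_succ h)]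
        simp
      · have hpre : [c].isPrefixOf (x :: t) = false := by
          simp [List.isPrefixOf]
          exact fun hcx => absurd hcx.symm hx
        rw [hpre]
        simp only [Bool.false_eq_true, if_false]
        rw [ih t (x :: acc) (Nat.le_of_succ_le_succ h)]
        simp [hx]

theorem pv_replace_single (cs : List Char) (c : Char) :
    PySem.Chars.replace cs [c] [] = cs.filter (· != c) := by
  simp only [PySem.Chars.replace, List.isEmpty_cons, Bool.false_eq_true, if_false]
  exact pv_replace_go_single c cs.length cs [] (le_refl _)

theorem pv_filter_fix (cs : List Char) (c : Char) :
    (cs.filter (· != c)).filter (· != c) = cs.filter (· != c) := by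
  rw [List.filter_filter]
  simp

theorem pv_fold_const (c : Char) (l : List Nat) (cs : List Char) :
    l.foldl (fun acc _ => PySem.Chars.replace acc [c] []) (cs.filter (· != c)) =
      cs.filter (· != c) := by
  induction l with
  | nil => rfl
  | cons a t ih =>
    simp only [List.foldl_cons]
    rw [pv_replace_single, pv_filter_fix, ih]

theorem pv_inner_eq (conf : List Char) (c : Char) :
    (List.range (PySem.Chars.count conf [c])).foldl
      (fun acc _ => PySem.Chars.replace acc [c] []) conf = conf.filter (· != c) := by
  rw [pv_count_single]
  cases h : conf.count c with
  | zero =>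
    simp only [List.range_zero, List.foldl_nil]
    symm
    rw [List.filter_eq_self]
    intro a ha
    have : a ≠ c := by
      intro hac; subst hac
      exact absurd h (by simpa [List.count_eq_zero] using ha)
    simpa using this
  | succ n =>
    rw [List.range_succ_eq_map]
    simp only [List.foldl_cons]
    rw [pv_replace_single, pv_fold_const]

-- A's stripped string is the filter of the disallowed characters
theorem pv_conf_eq (s : List Char) :
    ['.', '-', ' '].foldl
      (fun conf i =>
        (List.range (PySem.Chars.count conf [i])).foldl
          (fun acc _ => PySem.Chars.replace acc [i] []) conf) s =
      s.filter (fun c => !(List.contains ['.', '-', ' '] c)) := by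
  simp only [List.foldl_cons, List.foldl_nil, pv_inner_eq, List.filter_filter]
  apply List.filter_congr
  intro a _
  cases Decidable.em (a = '.') <;> cases Decidable.em (a = '-') <;>
    cases Decidable.em (a = ' ') <;> simp_all

theorem pv_loop_true (vals : List String) (l : List String) :
    pvLoopCodesA vals l (some true) = some (l.all (fun c => vals.contains c)) := by
  induction l with
  | nil => simp [pvLoopCodesA]
  | cons c t ih =>
    simp only [pvLoopCodesA, List.all_cons]
    by_cases h : vals.contains c = true
    · rw [if_pos h, ih, h]; simp
    · rw [if_neg h]
      simp only [Bool.not_eq_true] at h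
      rw [h]; simp

theorem pv_loop_none (vals : List String) (l : List String) :
    pvLoopCodesA vals l none =
      if l = [] then none else some (l.all (fun c => vals.contains c)) := by
  cases l with
  | nil => simp [pvLoopCodesA]
  | cons c t =>
    simp only [pvLoopCodesA, if_neg (List.cons_ne_nil c t), List.all_cons]
    by_cases h : vals.contains c = true
    · rw [if_pos h, pv_loop_true, h]; simp
    · rw [if_neg h]
      simp only [Bool.not_eq_true] at h
      rw [h]; simp

-- split₀.go only prepends its accumulator (reversed)
theorem pv_split_go_acc (l : List Char) : ∀ (cur : List Char) (acc : List (List Char)),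
    PySem.Chars.split₀.go l cur acc = acc.reverse ++ PySem.Chars.split₀.go l cur [] := by
  induction l with
  | nil =>
    intro cur acc
    rw [PySem.Chars.split₀.go, PySem.Chars.split₀.go]
    by_cases h : cur.isEmpty = true <;> simp [h]
  | cons c rest ih =>
    intro cur acc
    conv_lhs => rw [PySem.Chars.split₀.go]
    conv_rhs => rw [PySem.Chars.split₀.go]
    by_cases hs : PySem.Chars.isspace c = true
    · by_cases hc : cur.isEmpty = true
      · simp only [hs, hc, if_true]
        exact ih [] acc
      · simp only [hs, hc, Bool.false_eq_true, if_false, if_true]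
        rw [ih [] (cur.reverse :: acc), ih [] [cur.reverse]]
        simp
    · simp only [hs, Bool.false_eq_true, if_false]
      exact ih (c :: cur) acc

-- if any character outside {'.','-',' '} remains, the scan rejects
theorem pv_scan_bad (valid : List String) : ∀ (l : List Char) (token : List Char) (seen : Bool),
    (∃ c ∈ l, c ∉ ['.', '-', ' ']) →
    pvScanB valid (l ++ [' ']) token seen = some false := by
  intro l
  induction l with
  | nil => intro _ _ h; simp at h
  | cons c rest ih =>
    intro token seen h
    obtain ⟨d, hd, hdbad⟩ := h
    by_cases hc : c = ' '
    · subst hc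
      have hrest : ∃ c ∈ rest, c ∉ ['.', '-', ' '] := by
        rcases List.mem_cons.mp hd with h1 | h1
        · exfalso; exact hdbad (by rw [h1]; simp)
        · exact ⟨d, h1, hdbad⟩
      simp only [List.cons_append, pvScanB, reduceIte]
      by_cases ht : token.isEmpty = true
      · rw [if_pos ht]; exact ih _ _ hrest
      · rw [if_neg ht]
        by_cases hv : valid.contains (String.ofList token) = true
        · rw [if_pos hv]; exact ih _ _ hrest
        · rw [if_neg hv]
    · by_cases hdot : c = '.' ∨ c = '-'
      · have hrest : ∃ c ∈ rest, c ∉ ['.', '-', ' '] := by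
          rcases List.mem_cons.mp hd with h1 | h1
          · exfalso
            apply hdbad
            rw [h1]
            rcases hdot with h2 | h2 <;> rw [h2] <;> simp
          · exact ⟨d, h1, hdbad⟩
        simp only [List.cons_append, pvScanB, if_neg hc, if_pos hdot]
        exact ih _ _ hrest
      · simp [pvScanB, hc, hdot]

-- core invariant: on strings over {'.','-',' '} the scan computes split-then-validate
theorem pv_scan_good (valid : List String) : ∀ (l : List Char) (token : List Char) (seen : Bool),
    (∀ c ∈ l, c ∈ ['.', '-', ' ']) →
    pvScanB valid (l ++ [' ']) token seen =
      (match PySem.Chars.split₀.go l token.reverse [] with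
       | [] => if seen then some true else none
       | toks => some (toks.all (fun t => valid.contains (String.ofList t)))) := by
  intro l
  induction l with
  | nil =>
    intro token seen _
    by_cases ht : token.isEmpty = true
    · have : token = [] := by simpa [List.isEmpty_iff] using ht
      subst this
      rw [PySem.Chars.split₀.go]
      simp [pvScanB]
    · have htr : token.reverse.isEmpty = false := by
        cases token <;> simp_all
      have hgo : PySem.Chars.split₀.go [] token.reverse [] = [token] := by
        rw [PySem.Chars.split₀.go]
        simp [htr]
      simp only [List.nil_append, if_neg ht, hgo]
      simp only [pvScanB, reduceIte, if_neg ht]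
      by_cases hv : valid.contains (String.ofList token) = true
      · rw [if_pos hv]
        simp only [pvScanB, List.all_cons, List.all_nil, hv, Bool.and_true]
      · rw [if_neg hv]
        simp only [List.all_cons, List.all_nil, Bool.and_true]
        rw [Bool.not_eq_true] at hv
        rw [hv]
  | cons c rest ih =>
    intro token seen hgood
    have hrest : ∀ c ∈ rest, c ∈ ['.', '-', ' '] := fun d hd => hgood d (List.mem_cons_of_mem _ hd)
    by_cases hc : c = ' '
    · subst hc
      have hs : PySem.Chars.isspace ' ' = true := by decide
      by_cases ht : token.isEmpty = true
      · have htnil : token = [] := by simpa [List.isEmpty_iff] using ht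
        subst htnil
        simp only [List.cons_append, pvScanB, reduceIte, List.isEmpty_nil]
        rw [ih [] seen hrest]
        rw [PySem.Chars.split₀.go]
        simp [hs]
      · have htr : token.reverse.isEmpty = false := by
          cases token <;> simp_all
        simp only [List.cons_append, pvScanB, reduceIte, if_neg ht]
        have hgo : PySem.Chars.split₀.go (' ' :: rest) token.reverse [] =
            token :: PySem.Chars.split₀.go rest [] [] := by
          rw [PySem.Chars.split₀.go]
          simp only [hs, htr, Bool.false_eq_true, if_false, if_true]
          rw [pv_split_go_acc rest [] [token.reverse.reverse]]
          simp
        rw [hgo]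
        by_cases hv : valid.contains (String.ofList token) = true
        · rw [if_pos hv, ih [] true hrest]
          simp only [List.reverse_nil]
          cases hrem : PySem.Chars.split₀.go rest [] [] with
          | nil => simp only [List.all_cons, List.all_nil, hv, Bool.and_true, reduceIte]
          | cons a as => simp only [List.all_cons, hv, Bool.true_and]
        · rw [if_neg hv]
          rw [Bool.not_eq_true] at hv
          simp only [List.all_cons, hv, Bool.false_and]
    · have hmem := hgood c List.mem_cons_self
      have hdot : c = '.' ∨ c = '-' := by
        simp only [List.mem_cons, List.not_mem_nil, or_false] at hmem
        rcases hmem with h | h | h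
        · exact Or.inl h
        · exact Or.inr h
        · exact absurd h hc
      have hs : PySem.Chars.isspace c = false := by
        rcases hdot with h | h <;> (subst h; decide)
      simp only [List.cons_append, pvScanB, if_neg hc, if_pos hdot]
      rw [ih (token ++ [c]) seen hrest]
      rw [PySem.Chars.split₀.go]
      simp [hs]

-- the two guard conditions: A's stripped string is empty iff no bad character
theorem pv_filter_empty_iff (s : List Char) :
    (s.filter (fun c => !(List.contains ['.', '-', ' '] c))).length = 0 ↔
      (∀ c ∈ s, c ∈ ['.', '-', ' ']) := by
  rw [List.length_eq_zero_iff, List.filter_eq_nil_iff]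
  constructor <;> intro h c hc <;> have h2 := h c hc <;> simp at h2 ⊢ <;> tauto

-- ===== VERDICT (by name: the statement is the Claim_ definition above) =====
theorem is_validated_morse_code_spec : Claim_equal_is_validated_morse_code := by
  intro s _
  unfold Spec_is_validated_morse_code is_validated_morse_code is_validated_morse_code_alt
  simp only [pv_conf_eq]
  by_cases hg : (s.toList.filter (fun c => !(List.contains ['.', '-', ' '] c))).length ≠ 0
  · rw [if_pos hg]
    have hbad : ∃ c ∈ s.toList, c ∉ ['.', '-', ' '] := by
      rcases List.exists_mem_of_length_pos (Nat.pos_of_ne_zero hg) with ⟨c, hc⟩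
      have := List.mem_filter.mp hc
      exact ⟨c, this.1, by simpa using this.2⟩
    rw [pv_scan_bad _ _ _ _ hbad]
  · rw [if_neg hg]
    have hgood : ∀ c ∈ s.toList, c ∈ ['.', '-', ' '] :=
      (pv_filter_empty_iff s.toList).mp (not_ne_iff.mp hg)
    rw [pv_scan_good _ _ _ _ hgood, pv_loop_none]
    have hsplit : PySem.Str.split₀ s =
        (PySem.Chars.split₀.go s.toList [] []).map String.ofList := by
      simp [PySem.Str.split₀, PySem.Chars.split₀]
    rw [hsplit]
    simp only [List.reverse_nil]
    cases hrem : PySem.Chars.split₀.go s.toList [] [] with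
    | nil => simp
    | cons a as =>
      simp only [List.map_cons]
      rw [if_neg (List.cons_ne_nil _ _)]
      simp [List.all_map, Function.comp_def]
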